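-- pv_equiv track=rewrite | github.com/KaranDhayakar/Autonomous-vehicles | lab1_python/src/lab1_review.py | cond_cum_sum
-- ===== SOURCE A (Python) =====
-- def cond_cum_sum(a: int, b: int) -> int:
--     sum=0
--     i = 0
--     while i<a:
--         if i%b != 0:
--             sum = sum+i
--         i = i +1
--     return sum
--
--     '''
--     Find the cumulative sum of numbers from 0 to a-1 that are not divisible by b
--     Hint: % will be useful
--     '''
--     pass
-- ===== SOURCE B (Python) =====
-- def cond_cum_sum(a: int, b: int) -> int:
--     if a <= 0:
--         return 0
--     m = abs(b)
--     k = (a - 1) // m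
--     return a * (a - 1) // 2 - m * k * (k + 1) // 2
-- ===== Notes on version B (the rewrite author's own statement) =====
-- stated objective: faster
-- what changed: Replaced the O(a) accumulation loop by the closed form: Gauss sum of 0..a-1 minus the arithmetic-series sum of the multiples of |b| below a.
import Mathlib
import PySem

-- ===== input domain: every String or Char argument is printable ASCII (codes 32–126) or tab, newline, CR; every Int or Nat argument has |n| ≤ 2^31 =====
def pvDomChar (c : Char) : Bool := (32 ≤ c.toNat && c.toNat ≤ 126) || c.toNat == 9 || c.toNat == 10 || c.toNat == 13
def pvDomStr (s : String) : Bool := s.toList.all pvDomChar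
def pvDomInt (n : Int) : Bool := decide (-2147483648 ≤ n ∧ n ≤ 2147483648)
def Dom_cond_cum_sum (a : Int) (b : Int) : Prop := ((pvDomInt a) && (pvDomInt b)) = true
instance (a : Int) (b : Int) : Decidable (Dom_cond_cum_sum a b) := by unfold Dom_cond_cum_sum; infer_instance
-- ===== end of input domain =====

-- B replaces A's O(a) accumulation loop by the closed form (Gauss sum minus the sum of multiples of |b|); objective: faster.


-- ===== PORT A =====
-- the while loop: state (sum, i), runs while i < a
def condLoopA (a b sum i : Int) : Int :=
  if _h : i < a then
    condLoopA a b (if PySem.Int.mod i b ≠ 0 then sum + i else sum) (i + 1)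
  else sum
termination_by (a - i).toNat
decreasing_by omega

def cond_cum_sum (a : Int) (b : Int) : Int := condLoopA a b 0 0

-- ===== PORT B =====
def cond_cum_sum_alt (a : Int) (b : Int) : Int :=
  if a ≤ 0 then 0
  else
    let m := |b|
    let k := PySem.Int.floordiv (a - 1) m
    PySem.Int.floordiv (a * (a - 1)) 2 - PySem.Int.floordiv (m * k * (k + 1)) 2

-- ===== PRECONDITION & SPEC =====
-- Pre_ excludes exactly the inputs (b = 0 with a > 0) on which Python A raises ZeroDivisionError.
def Pre_cond_cum_sum (a : Int) (b : Int) : Prop := b ≠ 0 ∨ a ≤ 0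
instance (a : Int) (b : Int) : Decidable (Pre_cond_cum_sum a b) := by unfold Pre_cond_cum_sum; infer_instance
def pvWitness_cond_cum_sum : Int × Int := (7, 3)

def Spec_cond_cum_sum (a : Int) (b : Int) (out : Int) : Prop := out = cond_cum_sum_alt a b
instance (a : Int) (b : Int) (out : Int) : Decidable (Spec_cond_cum_sum a b out) := by unfold Spec_cond_cum_sum; infer_instance

-- ===== CLAIM (what is proved, stated in full; the proofs are below) =====
def Claim_equal_cond_cum_sum : Prop := ∀ (a : Int) (b : Int), Dom_cond_cum_sum a b → Pre_cond_cum_sum a b → Spec_cond_cum_sum a b (cond_cum_sum a b)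

-- ===== LEMMAS AND PROOFS =====

-- unrolling the loop bound by one adds the last term (if it is counted)
theorem condLoopA_succ (a b : Int) (s i : Int) (hia : i ≤ a) :
    condLoopA (a + 1) b s i =
      condLoopA a b s i + (if PySem.Int.mod a b ≠ 0 then a else 0) := by
  have H : ∀ n : Nat, ∀ s i : Int, (a - i).toNat = n → i ≤ a →
      condLoopA (a + 1) b s i =
        condLoopA a b s i + (if PySem.Int.mod a b ≠ 0 then a else 0) := by
    intro n
    induction n with
    | zero =>
        intro s i hn hi
        have hia : i = a := by omega
        subst hia
        rw [condLoopA, dif_pos (show i < i + 1 by omega), condLoopA,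
          dif_neg (show ¬ (i + 1 < i + 1) by omega), condLoopA,
          dif_neg (show ¬ (i < i) by omega)]
        split_ifs <;> ring
    | succ n ih =>
        intro s i hn hi
        have hia : i < a := by omega
        rw [condLoopA, dif_pos (show i < a + 1 by omega)]
        conv_rhs => rw [condLoopA, dif_pos hia]
        exact ih _ (i + 1) (by omega) (by omega)
  exact H (a - i).toNat s i rfl hia

theorem alt_succ (a b : Int) (hb : b ≠ 0) (ha : 0 ≤ a) :
    cond_cum_sum_alt (a + 1) b =
      cond_cum_sum_alt a b + (if PySem.Int.mod a b ≠ 0 then a else 0) := by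
  have hm : 0 < |b| := abs_pos.mpr hb
  have h2 : (0 : Int) < 2 := by norm_num
  rcases eq_or_lt_of_le ha with h0 | h1
  · -- a = 0: both sides are 0
    rw [← h0]
    simp [cond_cum_sum_alt, PySem.Int.floordiv_eq_ediv_of_pos hm]
  · -- 1 ≤ a
    simp only [cond_cum_sum_alt, if_neg (show ¬ (a + 1 ≤ 0) by omega),
      if_neg (show ¬ (a ≤ 0) by omega),
      PySem.Int.floordiv_eq_ediv_of_pos hm, PySem.Int.floordiv_eq_ediv_of_pos h2]
    have e1 : a + 1 - 1 = a := by ring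
    rw [e1]
    set m := |b| with hmdef
    set k := (a - 1) / m with hkdef
    set r := (a - 1) % m with hrdef
    have hk : m * k + r = a - 1 := Int.mul_ediv_add_emod (a - 1) m
    have hr0 : 0 ≤ r := Int.emod_nonneg _ (ne_of_gt hm)
    have hr1 : r < m := Int.emod_lt_of_pos _ hm
    have hdivle : ∀ q' rr : Int, a = m * q' + rr → 0 ≤ rr → rr < m → a / m = q' := by
      intro q' rr h hq0 hq1
      rw [h, add_comm, Int.add_mul_ediv_left _ _ (ne_of_gt hm), Int.ediv_eq_zero_of_lt hq0 hq1]
      ring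
    by_cases hc : r = m - 1
    · -- m divides a: the last term a is NOT counted; the multiples-sum gains a
      have hA : a = m * (k + 1) := by rw [mul_add, mul_one]; omega
      have hmod : PySem.Int.mod a b = 0 :=
        (PySem.Int.mod_eq_zero_iff_dvd a b).mpr ((abs_dvd b a).mp ⟨k + 1, hA⟩)
      have hq : a / m = k + 1 := by
        rw [hA, Int.mul_ediv_cancel_left _ (ne_of_gt hm)]
      rw [hq]
      have g1 : (a + 1) * a = a * (a - 1) + a * 2 := by ring
      have g2 : m * (k + 1) * (k + 1 + 1) = m * k * (k + 1) + (m * (k + 1)) * 2 := by ring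
      rw [g1, g2, Int.add_mul_ediv_right _ _ (two_ne_zero), Int.add_mul_ediv_right _ _ (two_ne_zero)]
      simp [hmod]
      linarith [hA]
    · -- m does not divide a: the multiples-sum is unchanged; the last term a is added
      have hq : a / m = k := hdivle k (r + 1) (by omega) (by omega) (by omega)
      have hmod : PySem.Int.mod a b ≠ 0 := by
        intro hz
        have hdvd : m ∣ a := (abs_dvd b a).mpr ((PySem.Int.mod_eq_zero_iff_dvd a b).mp hz)
        have hdvd2 : m ∣ a - m * k := dvd_sub hdvd (dvd_mul_right m k)
        rw [show a - m * k = r + 1 by omega] at hdvd2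
        have := Int.le_of_dvd (by omega) hdvd2
        omega
      rw [hq]
      have g1 : (a + 1) * a = a * (a - 1) + a * 2 := by ring
      rw [g1, Int.add_mul_ediv_right _ _ (two_ne_zero)]
      simp [hmod]
      ring

-- ===== VERDICT (by name: the statement is the Claim_ definition above) =====
theorem cond_cum_sum_spec : Claim_equal_cond_cum_sum := by
  intro a b _ hpre
  unfold Spec_cond_cum_sum
  rcases le_or_gt a 0 with ha | ha
  · unfold cond_cum_sum condLoopA cond_cum_sum_alt
    simp [not_lt.mpr ha, ha]
  · have hb : b ≠ 0 := hpre.resolve_right (by omega)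
    have key : ∀ n : Nat, cond_cum_sum (n : Int) b = cond_cum_sum_alt (n : Int) b := by
      intro n
      induction n with
      | zero =>
          unfold cond_cum_sum condLoopA cond_cum_sum_alt
          norm_num
      | succ k ih =>
          have hc : ((k + 1 : Nat) : Int) = (k : Int) + 1 := by push_cast; ring
          rw [hc]
          unfold cond_cum_sum
          rw [condLoopA_succ (k : Int) b 0 0 (by positivity)]
          rw [alt_succ (k : Int) b hb (by positivity)]
          unfold cond_cum_sum at ih
          rw [ih]
    have : a = ((a.toNat : Nat) : Int) := by omega
    rw [this]; exact key a.toNat
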